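-- pv_equiv track=rewrite | github.com/MuhammadRazi99/PythonLessons | KickStart/2022/irregularExpression.py | findVowel
-- ===== SOURCE A (Python) =====
-- def findVowel(expression):
--     vowel="aeiou"
--     indexList=[]
--     for i in vowel:
--         while(expression.find(i)!=-1):
--             indexList.append(expression.find(i))
--             expression=expression.replace(i,"",1)
--     return merge_sort(indexList)
--
-- def merge_sort(unsorted_list):
--    if len(unsorted_list) <= 1:
--       return unsorted_list
-- # Find the middle point and devide it
--    middle = len(unsorted_list) // 2
--    left_list = unsorted_list[:middle]
--    right_list = unsorted_list[middle:]
--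
--    left_list = merge_sort(left_list)
--    right_list = merge_sort(right_list)
--    return list(merge(left_list, right_list))
--
-- def merge(left_half,right_half):
--    res = []
--    while len(left_half) != 0 and len(right_half) != 0:
--       if left_half[0] < right_half[0]:
--          res.append(left_half[0])
--          left_half.remove(left_half[0])
--       else:
--          res.append(right_half[0])
--          right_half.remove(right_half[0])
--    if len(left_half) == 0:
--       res = res + right_half
--    else:
--       res = res + left_half
--    return res
-- ===== SOURCE B (Python) =====
-- def findVowel(expression):
--     order = {'a': 0, 'e': 1, 'i': 2, 'o': 3, 'u': 4}
--     counts = [0, 0, 0, 0, 0]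
--     out = []
--     for i, ch in enumerate(expression):
--         r = order.get(ch)
--         if r is not None:
--             out.append(i - sum(counts[:r + 1]))
--             counts[r] += 1
--     return sorted(out)
-- ===== Notes on version B (the rewrite author's own statement) =====
-- stated objective: faster
-- what changed: A repeatedly rescans and rewrites the string with find/replace for each vowel and hand-merges; B makes one pass computing each vowel occurrence's shifted index from running per-vowel counts, then sorts.
import Mathlib
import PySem

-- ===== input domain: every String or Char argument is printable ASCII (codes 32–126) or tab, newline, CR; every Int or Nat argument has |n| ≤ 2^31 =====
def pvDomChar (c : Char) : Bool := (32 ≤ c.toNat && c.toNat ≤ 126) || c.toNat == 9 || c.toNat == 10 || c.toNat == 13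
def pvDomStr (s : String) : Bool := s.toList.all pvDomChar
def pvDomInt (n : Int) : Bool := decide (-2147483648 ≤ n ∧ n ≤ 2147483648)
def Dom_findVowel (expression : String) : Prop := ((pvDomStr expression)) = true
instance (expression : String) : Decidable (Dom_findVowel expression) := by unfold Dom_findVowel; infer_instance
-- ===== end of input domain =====

-- B replaces A's repeated find/replace scans (quadratic) by one pass that computes each
-- vowel occurrence's shifted index from running per-vowel counts, then sorts (objective: faster).

-- ===== PORT A =====
-- merge(left_half, right_half): the while-loop appending the smaller head and removing it
-- (remove(left_half[0]) removes exactly the head) is the obvious structural recursion.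
def pvMerge : List Int → List Int → List Int
  | [], r => r
  | l, [] => l
  | a :: l, b :: r =>
    if a < b then a :: pvMerge l (b :: r) else b :: pvMerge (a :: l) r

-- merge_sort(unsorted_list); middle = len // 2, the two slices, recurse, merge.
def pvMergeSort (xs : List Int) : List Int :=
  if xs.length ≤ 1 then xs
  else
    pvMerge (pvMergeSort (PySem.List.slice xs none (some (PySem.Int.floordiv (xs.length : Int) 2))))
            (pvMergeSort (PySem.List.slice xs (some (PySem.Int.floordiv (xs.length : Int) 2)) none))
termination_by xs.length
decreasing_by
  · have h2 : PySem.Int.floordiv (xs.length : Int) 2 = ((xs.length / 2 : Nat) : Int) := by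
      exact_mod_cast PySem.Int.floordiv_natCast xs.length 2
    rw [h2, PySem.List.slice_to_natCast]
    simp only [List.length_take]
    omega
  · have h2 : PySem.Int.floordiv (xs.length : Int) 2 = ((xs.length / 2 : Nat) : Int) := by
      exact_mod_cast PySem.Int.floordiv_natCast xs.length 2
    rw [h2, PySem.List.slice_from_natCast]
    simp only [List.length_drop]
    omega

-- the inner 'while expression.find(i) != -1' loop; fuel = current length bounds the
-- number of removals.  expression.replace(c, "", 1) for a single character c removes
-- exactly the first occurrence of c: ported as List.erase (exact here).
def pvVowelLoop : Nat → List Char → Char → List Int → List Int × List Char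
  | 0, s, _, acc => (acc, s)
  | fuel + 1, s, c, acc =>
    if PySem.Chars.find s [c] != -1 then
      pvVowelLoop fuel (s.erase c) c (acc ++ [PySem.Chars.find s [c]])
    else (acc, s)

def findVowel (expression : String) : List Int :=
  let st := ['a', 'e', 'i', 'o', 'u'].foldl
    (fun (st : List Int × List Char) c => pvVowelLoop st.2.length st.2 c st.1)
    ([], expression.toList)
  pvMergeSort st.1

-- ===== PORT B =====
def pvOrder : PySem.Dict Char Int :=
  PySem.Dict.ofList [('a', 0), ('e', 1), ('i', 2), ('o', 3), ('u', 4)]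

-- one step of B's loop: on a vowel, append i - sum(counts[:r+1]) and bump counts[r]
def pvStepB (st : List Int × List Int) (p : Int × Char) : List Int × List Int :=
  match PySem.Dict.get? pvOrder p.2 with
  | none => st
  | some r =>
    (PySem.List.pySetD st.1 r (PySem.List.pyGetD st.1 r 0 + 1),
     st.2 ++ [p.1 - (PySem.List.slice st.1 none (some (r + 1))).sum])

def findVowel_alt (expression : String) : List Int :=
  let st := (PySem.List.enumerate expression.toList 0).foldl pvStepB ([0, 0, 0, 0, 0], [])
  PySem.List.sorted st.2 (fun x => x) false

-- ===== PRECONDITION & SPEC =====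
def Spec_findVowel (expression : String) (out : List Int) : Prop := out = findVowel_alt expression
instance (expression : String) (out : List Int) : Decidable (Spec_findVowel expression out) := by unfold Spec_findVowel; infer_instance

-- ===== CLAIM (what is proved, stated in full; the proofs are below) =====
def Claim_equal_findVowel : Prop := ∀ (expression : String), Dom_findVowel expression → Spec_findVowel expression (findVowel expression)

-- ===== LEMMAS AND PROOFS =====

-- The shifted indices A's find/remove loop appends for character c, scanning s with
-- running offset d (= original index minus occurrences of c already passed).
def occAux : List Char → Char → Int → List Int
  | [], _, _ => []
  | x :: xs, c, d => if x = c then d :: occAux xs c d else occAux xs c (d + 1)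

-- rank of a vowel in "aeiou" (spec-side mirror of pvOrder)
def rk? (x : Char) : Option Nat :=
  if x = 'a' then some 0 else if x = 'e' then some 1 else if x = 'i' then some 2
  else if x = 'o' then some 3 else if x = 'u' then some 4 else none

def pvVowel (r : Nat) : Char := ['a', 'e', 'i', 'o', 'u'].getD r ' '

-- keep characters that survive the first r vowel-removal stages
def keepB (r : Nat) (x : Char) : Bool :=
  match rk? x with
  | some q => decide (r ≤ q)
  | none => true

-- indices contributed by rank-r vowels of cs, offset d
def vseq (r : Nat) : List Char → Int → List Int
  | [], _ => []
  | x :: xs, d =>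
    match rk? x with
    | some q => if q = r then d :: vseq r xs d
                else if q < r then vseq r xs d else vseq r xs (d + 1)
    | none => vseq r xs (d + 1)

-- B's stream of shifted indices, one offset per vowel rank
def bgo : List Char → Int → Int → Int → Int → Int → List Int
  | [], _, _, _, _, _ => []
  | x :: xs, d0, d1, d2, d3, d4 =>
    match rk? x with
    | some 0 => d0 :: bgo xs d0 d1 d2 d3 d4
    | some 1 => d1 :: bgo xs (d0 + 1) d1 d2 d3 d4
    | some 2 => d2 :: bgo xs (d0 + 1) (d1 + 1) d2 d3 d4
    | some 3 => d3 :: bgo xs (d0 + 1) (d1 + 1) (d2 + 1) d3 d4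
    | some _ => d4 :: bgo xs (d0 + 1) (d1 + 1) (d2 + 1) (d3 + 1) d4
    | none => bgo xs (d0 + 1) (d1 + 1) (d2 + 1) (d3 + 1) (d4 + 1)

theorem prefix_singleton_drop (l : List Char) (a : Char) (n : Nat) :
    [a] <+: l.drop n ↔ l[n]? = some a := by
  rw [← List.head?_drop]
  cases h : l.drop n <;> simp [List.prefix_cons_iff, eq_comm]

theorem idxOf_le_of_getElem (s : List Char) (c : Char) (i : Nat) (hi : i < s.length)
    (h : s[i] = c) : s.idxOf c ≤ i := by
  induction s generalizing i with
  | nil => simp at hi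
  | cons x xs ih =>
    by_cases hx : x = c
    · simp [List.idxOf_cons, hx]
    · cases i with
      | zero => simp at h; exact absurd h hx
      | succ i' =>
        have hle := ih i' (by simpa using hi) (by simpa using h)
        simp only [List.idxOf_cons, cond_eq_if, beq_iff_eq, hx, if_false]
        omega

theorem find_single (s : List Char) (c : Char) (h : c ∈ s) :
    PySem.Chars.find s [c] = (s.idxOf c : Int) := by
  have hinf : [c] <:+: s := (List.singleton_infix_iff c s).mpr h
  have hne : PySem.Chars.find s [c] ≠ -1 := by
    rw [Ne, PySem.Chars.find_eq_neg_one_iff]; simpa using hinf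
  have hspec := PySem.Chars.findFrom_natCast_spec s [c] 0 (Nat.zero_le _) (by simpa using hne)
  rw [show ((0 : Nat) : Int) = 0 from rfl, PySem.Chars.findFrom_zero] at hspec
  obtain ⟨h0, hpre, hmin⟩ := hspec
  set j := PySem.Chars.find s [c] with hj
  rw [prefix_singleton_drop] at hpre
  have hjlt : j.toNat < s.length := by
    by_contra hh
    rw [List.getElem?_eq_none_iff.mpr (by omega)] at hpre
    simp at hpre
  have hgetj : s[j.toNat] = c := by
    rw [List.getElem?_eq_getElem hjlt] at hpre; exact Option.some.inj hpre
  have hidlt : s.idxOf c < s.length := List.idxOf_lt_length_of_mem h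
  have h1 : s.idxOf c ≤ j.toNat := idxOf_le_of_getElem s c j.toNat hjlt hgetj
  have h2 : ¬ (s.idxOf c < j.toNat) := by
    intro hlt
    have hm := hmin (s.idxOf c) (Nat.zero_le _) hlt
    rw [prefix_singleton_drop, List.getElem?_eq_getElem hidlt] at hm
    exact hm (by simp [List.getElem_idxOf hidlt])
  omega

theorem occAux_of_not_mem (s : List Char) (c : Char) (d : Int) (h : c ∉ s) :
    occAux s c d = [] := by
  induction s generalizing d with
  | nil => rfl
  | cons x xs ih =>
    simp only [List.mem_cons, not_or] at h
    simp [occAux, Ne.symm h.1, ih (d + 1) h.2]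

theorem occAux_erase (s : List Char) (c : Char) (d : Int) (h : c ∈ s) :
    occAux s c d = (d + (s.idxOf c : Int)) :: occAux (s.erase c) c d := by
  induction s generalizing d with
  | nil => simp at h
  | cons x xs ih =>
    by_cases hx : x = c
    · subst hx
      simp [occAux, List.idxOf_cons, List.erase_cons_head]
    · have hc : c ∈ xs := by rcases List.mem_cons.mp h with h' | h'; exact absurd h'.symm hx; exact h'
      simp only [occAux, if_neg hx]
      rw [ih (d + 1) hc, List.erase_cons_tail (by simpa using hx)]
      simp only [occAux, if_neg hx]
      congr 1
      simp only [List.idxOf_cons, cond_eq_if, beq_iff_eq, hx, if_false]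
      push_cast
      ring

theorem filter_ne_of_not_mem (s : List Char) (c : Char) (h : c ∉ s) :
    s.filter (fun x => x != c) = s := by
  apply List.filter_eq_self.mpr
  intro x hx
  have : x ≠ c := fun he => h (he ▸ hx)
  simp [this]

theorem filter_erase (s : List Char) (c : Char) :
    (s.erase c).filter (fun x => x != c) = s.filter (fun x => x != c) := by
  induction s with
  | nil => rfl
  | cons x xs ih =>
    by_cases hx : x = c
    · subst hx; simp [List.erase_cons_head, List.filter]
    · rw [List.erase_cons_tail (by simpa using hx)]
      simp [List.filter_cons, hx, ih]

theorem pvVowelLoop_spec (fuel : Nat) (s : List Char) (c : Char) (acc : List Int)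
    (hf : s.count c ≤ fuel) :
    pvVowelLoop fuel s c acc = (acc ++ occAux s c 0, s.filter (fun x => x != c)) := by
  induction fuel generalizing s acc with
  | zero =>
    have hnm : c ∉ s := by
      intro hmem; exact absurd (List.count_pos_iff.mpr hmem) (by omega)
    simp [pvVowelLoop, occAux_of_not_mem s c 0 hnm, filter_ne_of_not_mem s c hnm]
  | succ fuel ih =>
    by_cases hmem : c ∈ s
    · have hfind := find_single s c hmem
      have hne : PySem.Chars.find s [c] != -1 := by
        simp [hfind]
      rw [pvVowelLoop, if_pos hne]
      rw [ih (s.erase c) (acc ++ [PySem.Chars.find s [c]])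
        (by have := List.count_erase_self (a := c) (l := s); omega)]
      rw [occAux_erase s c 0 hmem, filter_erase, hfind]
      simp
    · have hfind : PySem.Chars.find s [c] = -1 := by
        rw [PySem.Chars.find_eq_neg_one_iff]
        intro hinf; exact hmem ((List.singleton_infix_iff c s).mp hinf)
      simp [pvVowelLoop, hfind, occAux_of_not_mem s c 0 hmem, filter_ne_of_not_mem s c hmem]

theorem pvMerge_perm (l r : List Int) : (pvMerge l r).Perm (l ++ r) := by
  fun_induction pvMerge with
  | case1 r => simp
  | case2 l h => simp
  | case3 a l b r hab ih => simpa using ih.cons a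
  | case4 a l b r hab ih =>
    refine (ih.cons b).trans ?_
    exact (List.perm_middle).symm

theorem pvMerge_pairwise (l r : List Int) (hl : l.Pairwise (· ≤ ·)) (hr : r.Pairwise (· ≤ ·)) :
    (pvMerge l r).Pairwise (· ≤ ·) := by
  fun_induction pvMerge with
  | case1 r => exact hr
  | case2 l h => exact hl
  | case3 a l b r hab ih =>
    rw [List.pairwise_cons] at hl ⊢
    refine ⟨fun y hy => ?_, ih hl.2 hr⟩
    have hy' : y ∈ l ++ b :: r := (pvMerge_perm l (b :: r)).mem_iff.mp hy
    rcases List.mem_append.mp hy' with h' | h'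
    · exact hl.1 y h'
    · rcases List.mem_cons.mp h' with rfl | h''
      · exact le_of_lt hab
      · rw [List.pairwise_cons] at hr
        exact le_trans (le_of_lt hab) (hr.1 y h'')
  | case4 a l b r hab ih =>
    rw [List.pairwise_cons] at hr ⊢
    push_neg at hab
    refine ⟨fun y hy => ?_, ih hl hr.2⟩
    have hy' : y ∈ (a :: l) ++ r := (pvMerge_perm (a :: l) r).mem_iff.mp hy
    rcases List.mem_append.mp hy' with h' | h'
    · rcases List.mem_cons.mp h' with rfl | h''
      · exact hab
      · rw [List.pairwise_cons] at hl
        exact le_trans hab (hl.1 y h'')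
    · exact hr.1 y h'

theorem slice_split (xs : List Int) :
    PySem.List.slice xs none (some (PySem.Int.floordiv (xs.length : Int) 2)) = xs.take (xs.length / 2) ∧
    PySem.List.slice xs (some (PySem.Int.floordiv (xs.length : Int) 2)) none = xs.drop (xs.length / 2) := by
  have h2 : PySem.Int.floordiv (xs.length : Int) 2 = ((xs.length / 2 : Nat) : Int) := by
    exact_mod_cast PySem.Int.floordiv_natCast xs.length 2
  rw [h2, PySem.List.slice_to_natCast, PySem.List.slice_from_natCast]
  exact ⟨rfl, rfl⟩

theorem pvMergeSort_perm (xs : List Int) : (pvMergeSort xs).Perm xs := by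
  fun_induction pvMergeSort with
  | case1 xs h => exact List.Perm.refl xs
  | case2 xs h ih1 ih2 =>
    rw [(slice_split xs).1] at ih1 ⊢
    rw [(slice_split xs).2] at ih2 ⊢
    refine (pvMerge_perm _ _).trans ?_
    refine (ih1.append ih2).trans ?_
    rw [List.take_append_drop]

theorem pvMergeSort_pairwise (xs : List Int) : (pvMergeSort xs).Pairwise (· ≤ ·) := by
  fun_induction pvMergeSort with
  | case1 xs h =>
    rcases xs with _ | ⟨x, _ | ⟨y, t⟩⟩
    · exact List.Pairwise.nil
    · simp
    · simp at h
  | case2 xs h ih1 ih2 => exact pvMerge_pairwise _ _ ih1 ih2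

theorem pvMergeSort_eq_sorted (xs : List Int) :
    pvMergeSort xs = PySem.List.sorted xs (fun x => x) false :=
  (PySem.List.sorted_id_eq_of_perm_of_pairwise xs (pvMergeSort xs)
    (pvMergeSort_perm xs) (pvMergeSort_pairwise xs)).symm

theorem pvOrder_get (ch : Char) :
    PySem.Dict.get? pvOrder ch = (rk? ch).map (fun q => (q : Int)) := by
  by_cases h1 : ch = 'a'
  · subst h1; decide
  by_cases h2 : ch = 'e'
  · subst h2; decide
  by_cases h3 : ch = 'i'
  · subst h3; decide
  by_cases h4 : ch = 'o'
  · subst h4; decide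
  by_cases h5 : ch = 'u'
  · subst h5; decide
  · rw [show (rk? ch).map (fun q => (q : Int)) = none from by simp [rk?, h1, h2, h3, h4, h5]]
    simp [pvOrder, PySem.Dict.ofList, PySem.Dict.get?]
    intro a b hab
    rw [show (PySem.Dict.empty.update [('a', (0 : Int)), ('e', 1), ('i', 2), ('o', 3), ('u', 4)]).items
        = [('a', (0 : Int)), ('e', 1), ('i', 2), ('o', 3), ('u', 4)] from by decide] at hab
    simp only [List.mem_cons, List.not_mem_nil, or_false, Prod.mk.injEq] at hab
    rcases hab with ⟨rfl, -⟩ | ⟨rfl, -⟩ | ⟨rfl, -⟩ | ⟨rfl, -⟩ | ⟨rfl, -⟩ <;>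
      (intro he; exact absurd he.symm (by assumption))

theorem keep0_true (x : Char) : keepB 0 x = true := by
  cases h : rk? x <;> simp [keepB, h]

theorem filter_keep0 (cs : List Char) : cs.filter (keepB 0) = cs :=
  List.filter_eq_self.mpr (fun x _ => keep0_true x)

theorem keep_step (r : Nat) (hr : r < 5) (x : Char) :
    (keepB r x && (x != ['a', 'e', 'i', 'o', 'u'].getD r ' ')) = keepB (r + 1) x := by
  by_cases h1 : x = 'a'
  · subst h1; interval_cases r <;> decide
  by_cases h2 : x = 'e'
  · subst h2; interval_cases r <;> decide
  by_cases h3 : x = 'i'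
  · subst h3; interval_cases r <;> decide
  by_cases h4 : x = 'o'
  · subst h4; interval_cases r <;> decide
  by_cases h5 : x = 'u'
  · subst h5; interval_cases r <;> decide
  · have hk : rk? x = none := by simp [rk?, h1, h2, h3, h4, h5]
    simp [keepB, hk]
    interval_cases r <;> simp [h1, h2, h3, h4, h5]

theorem filter_step (r : Nat) (hr : r < 5) (cs : List Char) :
    (cs.filter (keepB r)).filter (fun x => x != ['a', 'e', 'i', 'o', 'u'].getD r ' ')
      = cs.filter (keepB (r + 1)) := by
  rw [List.filter_filter]
  exact List.filter_congr (fun x _ => by rw [Bool.and_comm]; exact keep_step r hr x)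

-- one lemma per rank: the rank-r entries of cs are A's occAux run on the r-times-filtered string
theorem vseq_eq_occAux (r : Nat) (hr : r < 5) (cs : List Char) :
    ∀ d : Int, vseq r cs d = occAux (cs.filter (keepB r)) (['a', 'e', 'i', 'o', 'u'].getD r ' ') d := by
  induction cs with
  | nil => intro d; interval_cases r <;> rfl
  | cons x xs ih =>
    intro d
    by_cases h1 : x = 'a'
    · subst h1; interval_cases r <;> simp [vseq, rk?, keepB, occAux, List.filter_cons, ih]
    by_cases h2 : x = 'e'
    · subst h2; interval_cases r <;> simp [vseq, rk?, keepB, occAux, List.filter_cons, ih]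
    by_cases h3 : x = 'i'
    · subst h3; interval_cases r <;> simp [vseq, rk?, keepB, occAux, List.filter_cons, ih]
    by_cases h4 : x = 'o'
    · subst h4; interval_cases r <;> simp [vseq, rk?, keepB, occAux, List.filter_cons, ih]
    by_cases h5 : x = 'u'
    · subst h5; interval_cases r <;> simp [vseq, rk?, keepB, occAux, List.filter_cons, ih]
    · have hk : rk? x = none := by simp [rk?, h1, h2, h3, h4, h5]
      simp [vseq, hk, keepB, List.filter_cons, occAux, ih]
      intro hx
      exact absurd hx (by interval_cases r <;> simp [h1, h2, h3, h4, h5])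

-- B's interleaved stream is a permutation of the five per-vowel streams concatenated
theorem bgo_perm (cs : List Char) :
    ∀ d0 d1 d2 d3 d4 : Int,
      (bgo cs d0 d1 d2 d3 d4).Perm
        (vseq 0 cs d0 ++ vseq 1 cs d1 ++ vseq 2 cs d2 ++ vseq 3 cs d3 ++ vseq 4 cs d4) := by
  induction cs with
  | nil => intro _ _ _ _ _; simp [bgo, vseq]
  | cons x xs ih =>
    intro d0 d1 d2 d3 d4
    by_cases h1 : x = 'a'
    · subst h1
      have hk : rk? 'a' = some 0 := by decide
      simp only [bgo, vseq, hk]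
      norm_num
      simpa [List.append_assoc] using ih d0 d1 d2 d3 d4
    by_cases h2 : x = 'e'
    · subst h2
      have hk : rk? 'e' = some 1 := by decide
      simp only [bgo, vseq, hk]
      norm_num
      refine ((ih (d0 + 1) d1 d2 d3 d4).cons d1).trans ?_
      simpa [List.append_assoc] using
        (List.perm_middle (l₁ := vseq 0 xs (d0 + 1)) (a := d1)
          (l₂ := vseq 1 xs d1 ++ vseq 2 xs d2 ++ vseq 3 xs d3 ++ vseq 4 xs d4)).symm
    by_cases h3 : x = 'i'
    · subst h3
      have hk : rk? 'i' = some 2 := by decide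
      simp only [bgo, vseq, hk]
      norm_num
      refine ((ih (d0 + 1) (d1 + 1) d2 d3 d4).cons d2).trans ?_
      simpa [List.append_assoc] using
        (List.perm_middle (l₁ := vseq 0 xs (d0 + 1) ++ vseq 1 xs (d1 + 1)) (a := d2)
          (l₂ := vseq 2 xs d2 ++ vseq 3 xs d3 ++ vseq 4 xs d4)).symm
    by_cases h4 : x = 'o'
    · subst h4
      have hk : rk? 'o' = some 3 := by decide
      simp only [bgo, vseq, hk]
      norm_num
      refine ((ih (d0 + 1) (d1 + 1) (d2 + 1) d3 d4).cons d3).trans ?_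
      simpa [List.append_assoc] using
        (List.perm_middle
          (l₁ := vseq 0 xs (d0 + 1) ++ vseq 1 xs (d1 + 1) ++ vseq 2 xs (d2 + 1)) (a := d3)
          (l₂ := vseq 3 xs d3 ++ vseq 4 xs d4)).symm
    by_cases h5 : x = 'u'
    · subst h5
      have hk : rk? 'u' = some 4 := by decide
      simp only [bgo, vseq, hk]
      norm_num
      refine ((ih (d0 + 1) (d1 + 1) (d2 + 1) (d3 + 1) d4).cons d4).trans ?_
      simpa [List.append_assoc] using
        (List.perm_middle
          (l₁ := vseq 0 xs (d0 + 1) ++ vseq 1 xs (d1 + 1) ++ vseq 2 xs (d2 + 1) ++ vseq 3 xs (d3 + 1))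
          (a := d4) (l₂ := vseq 4 xs d4)).symm
    · have hk : rk? x = none := by simp [rk?, h1, h2, h3, h4, h5]
      simp only [bgo, vseq, hk]
      exact ih (d0 + 1) (d1 + 1) (d2 + 1) (d3 + 1) (d4 + 1)

-- B's foldl over enumerate, with counts [c0..c4] already consumed and offsets i - partial sums
theorem bfold (cs : List Char) :
    ∀ (i c0 c1 c2 c3 c4 : Int) (out : List Int),
      ((PySem.List.enumerate cs i).foldl pvStepB ([c0, c1, c2, c3, c4], out)).2
        = out ++ bgo cs (i - c0) (i - (c0 + c1)) (i - (c0 + c1 + c2))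
            (i - (c0 + c1 + c2 + c3)) (i - (c0 + c1 + c2 + c3 + c4)) := by
  induction cs with
  | nil => intro i c0 c1 c2 c3 c4 out; simp [PySem.List.enumerate, bgo]
  | cons x xs ih =>
    intro i c0 c1 c2 c3 c4 out
    rw [PySem.List.enumerate_cons, List.foldl_cons]
    by_cases h1 : x = 'a'
    · subst h1
      rw [show pvStepB ([c0, c1, c2, c3, c4], out) (i, 'a')
            = ([c0 + 1, c1, c2, c3, c4], out ++ [i - c0]) from by
        have hg : PySem.Dict.get? pvOrder 'a' = some 0 := by decide
        simp [pvStepB, hg, PySem.List.pySetD, PySem.List.pySet?, PySem.List.pyGetD,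
          PySem.List.pyGet?, PySem.List.pyIdx?, PySem.List.slice, PySem.List.clampIdx]]
      rw [ih]
      have hk : rk? 'a' = some 0 := by decide
      simp only [bgo, hk, List.append_assoc, List.singleton_append]
      norm_num <;> ring_nf
    by_cases h2 : x = 'e'
    · subst h2
      rw [show pvStepB ([c0, c1, c2, c3, c4], out) (i, 'e')
            = ([c0, c1 + 1, c2, c3, c4], out ++ [i - (c0 + c1)]) from by
        have hg : PySem.Dict.get? pvOrder 'e' = some 1 := by decide
        simp [pvStepB, hg, PySem.List.pySetD, PySem.List.pySet?, PySem.List.pyGetD,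
          PySem.List.pyGet?, PySem.List.pyIdx?, PySem.List.slice, PySem.List.clampIdx] <;> ring]
      rw [ih]
      have hk : rk? 'e' = some 1 := by decide
      simp only [bgo, hk, List.append_assoc, List.singleton_append]
      norm_num <;> ring_nf
    by_cases h3 : x = 'i'
    · subst h3
      rw [show pvStepB ([c0, c1, c2, c3, c4], out) (i, 'i')
            = ([c0, c1, c2 + 1, c3, c4], out ++ [i - (c0 + c1 + c2)]) from by
        have hg : PySem.Dict.get? pvOrder 'i' = some 2 := by decide
        simp [pvStepB, hg, PySem.List.pySetD, PySem.List.pySet?, PySem.List.pyGetD,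
          PySem.List.pyGet?, PySem.List.pyIdx?, PySem.List.slice, PySem.List.clampIdx] <;> ring]
      rw [ih]
      have hk : rk? 'i' = some 2 := by decide
      simp only [bgo, hk, List.append_assoc, List.singleton_append]
      norm_num <;> ring_nf
    by_cases h4 : x = 'o'
    · subst h4
      rw [show pvStepB ([c0, c1, c2, c3, c4], out) (i, 'o')
            = ([c0, c1, c2, c3 + 1, c4], out ++ [i - (c0 + c1 + c2 + c3)]) from by
        have hg : PySem.Dict.get? pvOrder 'o' = some 3 := by decide
        simp [pvStepB, hg, PySem.List.pySetD, PySem.List.pySet?, PySem.List.pyGetD,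
          PySem.List.pyGet?, PySem.List.pyIdx?, PySem.List.slice, PySem.List.clampIdx] <;> ring]
      rw [ih]
      have hk : rk? 'o' = some 3 := by decide
      simp only [bgo, hk, List.append_assoc, List.singleton_append]
      norm_num <;> ring_nf
    by_cases h5 : x = 'u'
    · subst h5
      rw [show pvStepB ([c0, c1, c2, c3, c4], out) (i, 'u')
            = ([c0, c1, c2, c3, c4 + 1], out ++ [i - (c0 + c1 + c2 + c3 + c4)]) from by
        have hg : PySem.Dict.get? pvOrder 'u' = some 4 := by decide
        simp [pvStepB, hg, PySem.List.pySetD, PySem.List.pySet?, PySem.List.pyGetD,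
          PySem.List.pyGet?, PySem.List.pyIdx?, PySem.List.slice, PySem.List.clampIdx] <;> ring]
      rw [ih]
      have hk : rk? 'u' = some 4 := by decide
      simp only [bgo, hk, List.append_assoc, List.singleton_append]
      norm_num <;> ring_nf
    · have hg : PySem.Dict.get? pvOrder x = none := by
        rw [pvOrder_get, show rk? x = none from by simp [rk?, h1, h2, h3, h4, h5]]
        rfl
      rw [show pvStepB ([c0, c1, c2, c3, c4], out) (i, x) = ([c0, c1, c2, c3, c4], out) from by
        simp [pvStepB, hg]]
      rw [ih]
      have hk : rk? x = none := by simp [rk?, h1, h2, h3, h4, h5]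
      simp only [bgo, hk]
      ring_nf

-- the A-side fold over the five vowels, stage by stage
theorem findVowel_fold (cs : List Char) :
    (['a', 'e', 'i', 'o', 'u'].foldl
        (fun (st : List Int × List Char) c => pvVowelLoop st.2.length st.2 c st.1)
        ([], cs)).1
      = vseq 0 cs 0 ++ vseq 1 cs 0 ++ vseq 2 cs 0 ++ vseq 3 cs 0 ++ vseq 4 cs 0 := by
  simp only [List.foldl_cons, List.foldl_nil]
  rw [pvVowelLoop_spec _ _ _ _ (List.count_le_length)]
  dsimp only
  rw [pvVowelLoop_spec _ _ _ _ (List.count_le_length)]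
  dsimp only
  rw [pvVowelLoop_spec _ _ _ _ (List.count_le_length)]
  dsimp only
  rw [pvVowelLoop_spec _ _ _ _ (List.count_le_length)]
  dsimp only
  rw [pvVowelLoop_spec _ _ _ _ (List.count_le_length)]
  dsimp only
  have st1 : cs.filter (fun x => x != 'a') = cs.filter (keepB 1) := by
    calc cs.filter (fun x => x != 'a')
        = (cs.filter (keepB 0)).filter (fun x => x != 'a') := by rw [filter_keep0]
      _ = cs.filter (keepB 1) := filter_step 0 (by norm_num) cs
  rw [st1]
  have st2 : (cs.filter (keepB 1)).filter (fun x => x != 'e') = cs.filter (keepB 2) :=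
    filter_step 1 (by norm_num) cs
  rw [st2]
  have st3 : (cs.filter (keepB 2)).filter (fun x => x != 'i') = cs.filter (keepB 3) :=
    filter_step 2 (by norm_num) cs
  rw [st3]
  have st4 : (cs.filter (keepB 3)).filter (fun x => x != 'o') = cs.filter (keepB 4) :=
    filter_step 3 (by norm_num) cs
  rw [st4]
  have v0 : vseq 0 cs 0 = occAux cs 'a' 0 := by
    have h := vseq_eq_occAux 0 (by norm_num) cs 0
    rw [filter_keep0 cs] at h
    exact h
  have v1 : vseq 1 cs 0 = occAux (cs.filter (keepB 1)) 'e' 0 := vseq_eq_occAux 1 (by norm_num) cs 0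
  have v2 : vseq 2 cs 0 = occAux (cs.filter (keepB 2)) 'i' 0 := vseq_eq_occAux 2 (by norm_num) cs 0
  have v3 : vseq 3 cs 0 = occAux (cs.filter (keepB 3)) 'o' 0 := vseq_eq_occAux 3 (by norm_num) cs 0
  have v4 : vseq 4 cs 0 = occAux (cs.filter (keepB 4)) 'u' 0 := vseq_eq_occAux 4 (by norm_num) cs 0
  rw [← v0, ← v1, ← v2, ← v3, ← v4]
  simp [List.append_assoc]

-- ===== VERDICT (by name: the statement is the Claim_ definition above) =====
theorem findVowel_spec : Claim_equal_findVowel := by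
  unfold Claim_equal_findVowel
  intro expression _
  unfold Spec_findVowel findVowel findVowel_alt
  dsimp only
  rw [findVowel_fold expression.toList, pvMergeSort_eq_sorted]
  rw [bfold expression.toList 0 0 0 0 0 0 []]
  norm_num
  rw [PySem.List.sorted_id_eq_sorted_id_iff_perm]
  exact ((bgo_perm expression.toList 0 0 0 0 0).trans (by simp [List.append_assoc])).symm
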